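-- pv_equiv track=rewrite | github.com/cutehammond772/problem-solving-archive | 백준/Silver/28081. 직사각형 피자/직사각형 피자.py | solve
-- ===== SOURCE A (Python) =====
-- def solve(rows, cols, K):
-- 	result = 0
--
-- 	rows.sort()
-- 	cols.sort()
--
-- 	R, C = len(rows), len(cols)
-- 	r_off, c_off = R - 1, 0
--
-- 	while r_off >= 0 and c_off < C:
-- 		area = rows[r_off] * cols[c_off]
--
-- 		if area <= K:
-- 			result += r_off + 1
-- 			c_off += 1
-- 			continue
--
-- 		r_off -= 1
--
-- 	return result
-- ===== SOURCE B (Python) =====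
-- def solve(rows, cols, K):
--     rows.sort()
--     cols.sort()
--     total = 0
--     r = len(rows) - 1
--     for v in cols:
--         if r < 0:
--             break
--         if v <= 0:
--             # product rows[i]*v is nonincreasing in i: either the top row
--             # qualifies (pointer unchanged) or no remaining row ever will.
--             if rows[r] * v > K:
--                 break
--             total += r + 1
--         else:
--             # rows[i]*v is nondecreasing in i: binary-search the number of
--             # qualifying rows among rows[0..r] (multiplication, no division).
--             lo, hi = 0, r + 1
--             while lo < hi:
--                 mid = (lo + hi) // 2
--                 if rows[mid] * v <= K:
--                     lo = mid + 1
--                 else: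
--                     hi = mid
--             if lo == 0:
--                 break
--             r = lo - 1
--             total += r + 1
--     return total
-- ===== Notes on version B (the rewrite author's own statement) =====
-- stated objective: alternative
-- what changed: A's single two-pointer while-loop (amortised inner decrement scan interleaved with column consumption) is replaced by a for-loop over the sorted columns that, per column, either resolves the sign-nonpositive case directly from the top remaining row or binary-searches the qualifying row prefix by multiplication comparison.
import Mathlib
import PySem

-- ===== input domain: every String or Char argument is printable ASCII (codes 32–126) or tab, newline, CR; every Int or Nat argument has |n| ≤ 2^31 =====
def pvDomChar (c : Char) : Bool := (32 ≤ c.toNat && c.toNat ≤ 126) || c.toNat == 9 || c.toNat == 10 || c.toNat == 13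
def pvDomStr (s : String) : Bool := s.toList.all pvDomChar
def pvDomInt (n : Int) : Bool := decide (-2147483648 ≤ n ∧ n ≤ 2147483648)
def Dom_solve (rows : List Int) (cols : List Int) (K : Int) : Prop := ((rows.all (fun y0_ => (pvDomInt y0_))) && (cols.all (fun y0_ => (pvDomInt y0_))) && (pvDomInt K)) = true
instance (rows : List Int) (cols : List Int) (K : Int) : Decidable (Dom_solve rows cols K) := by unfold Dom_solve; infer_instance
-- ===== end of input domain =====

-- B replaces A's amortised two-pointer inner decrement scan by a per-column binary search
-- over the remaining row prefix, splitting on the column's sign (objective: alternative).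
-- Both Pythons sort their list arguments IN PLACE; the equivalence proved here is about
-- the RETURN value only (B performs the same mutation as A).

-- ===== PORT A =====
-- A's while-loop; rows[r_off] / cols[c_off] are always in range when reached from
-- `solve`, so xs[i] is ported as pyGetD xs i 0.
def solveLoopA (rs : List Int) (cs : List Int) (K : Int) (r : Int) (c : Int) (acc : Int) : Int :=
  if h : 0 ≤ r ∧ c < (cs.length : Int) then
    if PySem.List.pyGetD rs r 0 * PySem.List.pyGetD cs c 0 ≤ K then
      solveLoopA rs cs K r (c + 1) (acc + (r + 1))
    else
      solveLoopA rs cs K (r - 1) c acc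
  else acc
termination_by ((r + 1).toNat + ((cs.length : Int) - c).toNat)
decreasing_by all_goals omega

def solve (rows : List Int) (cols : List Int) (K : Int) : Int :=
  let rs := PySem.List.sorted rows (fun x => x)
  let cs := PySem.List.sorted cols (fun x => x)
  solveLoopA rs cs K ((rs.length : Int) - 1) 0 0

-- ===== PORT B =====
-- B's hand-written binary search: number of indices in [lo, hi) ∪ [0, lo) whose row
-- value times v stays ≤ K (rows[mid] is always in range when reached from solveLoopB).
def bsearchB (rs : List Int) (v : Int) (K : Int) (lo : Int) (hi : Int) : Int :=
  if h : lo < hi then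
    let mid := PySem.Int.floordiv (lo + hi) 2
    if PySem.List.pyGetD rs mid 0 * v ≤ K then
      bsearchB rs v K (mid + 1) hi
    else
      bsearchB rs v K lo mid
  else lo
termination_by (hi - lo).toNat
decreasing_by
  · have h1 := (PySem.Int.le_floordiv_iff_mul_le (a := lo + hi) (b := 2) (q := lo) (by norm_num)).mpr (by omega)
    omega
  · have h2 := (PySem.Int.floordiv_lt_iff_lt_mul (a := lo + hi) (b := 2) (q := hi) (by norm_num)).mpr (by omega)
    omega

-- B's for-loop over the sorted column values, keeping the shrinking row pointer r.
def solveLoopB (rs : List Int) (K : Int) (vs : List Int) (r : Int) (total : Int) : Int :=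
  match vs with
  | [] => total
  | v :: rest =>
    if r < 0 then total
    else if v ≤ 0 then
      if PySem.List.pyGetD rs r 0 * v > K then total
      else solveLoopB rs K rest r (total + (r + 1))
    else
      let lo := bsearchB rs v K 0 (r + 1)
      if lo = 0 then total
      else solveLoopB rs K rest (lo - 1) (total + ((lo - 1) + 1))

def solve_alt (rows : List Int) (cols : List Int) (K : Int) : Int :=
  let rs := PySem.List.sorted rows (fun x => x)
  let cs := PySem.List.sorted cols (fun x => x)
  solveLoopB rs K cs ((rs.length : Int) - 1) 0

-- ===== PRECONDITION & SPEC =====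
def Spec_solve (rows : List Int) (cols : List Int) (K : Int) (out : Int) : Prop := out = solve_alt rows cols K
instance (rows : List Int) (cols : List Int) (K : Int) (out : Int) : Decidable (Spec_solve rows cols K out) := by unfold Spec_solve; infer_instance

-- ===== CLAIM (what is proved, stated in full; the proofs are below) =====
def Claim_equal_solve : Prop := ∀ (rows : List Int) (cols : List Int) (K : Int), Dom_solve rows cols K → Spec_solve rows cols K (solve rows cols K)

-- ===== LEMMAS AND PROOFS =====

-- Proof-side description of A's inner decrement scan: the first index ≤ r (scanning
-- downward) whose row value times v is ≤ K, or -1 if the scan exhausts the rows.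
def topIdx (rs : List Int) (v : Int) (K : Int) (r : Int) : Int :=
  if h : 0 ≤ r then
    if PySem.List.pyGetD rs r 0 * v ≤ K then r else topIdx rs v K (r - 1)
  else -1
termination_by (r + 1).toNat
decreasing_by omega

-- One macro-step of A's loop: the run of `r -= 1` decrements followed by the consuming
-- step (or exit) equals a jump to topIdx.
lemma loopA_step (rs cs : List Int) (K r c acc v : Int)
    (hv : PySem.List.pyGetD cs c 0 = v) (hc : c < (cs.length : Int)) :
    solveLoopA rs cs K r c acc =
      (if 0 ≤ topIdx rs v K r then
        solveLoopA rs cs K (topIdx rs v K r) (c + 1) (acc + (topIdx rs v K r + 1))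
      else acc) := by
  fun_induction topIdx rs v K r generalizing acc with
  | case1 r h hle =>
    rw [if_pos h, solveLoopA, dif_pos ⟨h, hc⟩, hv, if_pos hle]
  | case2 r h hle ih =>
    rw [solveLoopA, dif_pos ⟨h, hc⟩, hv, if_neg hle]
    exact ih acc
  | case3 r h =>
    rw [if_neg (by omega), solveLoopA, dif_neg (by omega)]

-- If v ≤ 0 and the topmost remaining row already fails, every lower row fails too
-- (row values only shrink downward), so the scan exhausts: topIdx = -1.
lemma topIdx_eq_neg_one (rs : List Int) (v K r : Int)
    (hmono : ∀ i j : Int, 0 ≤ i → i ≤ j → j ≤ r →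
      PySem.List.pyGetD rs i 0 * v ≤ K → PySem.List.pyGetD rs j 0 * v ≤ K)
    (hfail : ∀ i : Int, 0 ≤ i → i ≤ r → ¬ PySem.List.pyGetD rs i 0 * v ≤ K) :
    topIdx rs v K r = -1 := by
  fun_induction topIdx rs v K r with
  | case1 r h hle => exact absurd hle (hfail r h le_rfl)
  | case2 r h hle ih =>
    exact ih (fun i j hi hij hj => hmono i j hi hij (by omega))
      (fun i hi hij => hfail i hi (by omega))
  | case3 r h => rfl

-- topIdx of a downward-closed predicate with true-prefix boundary t equals t - 1.
lemma topIdx_eq_of_boundary (rs : List Int) (v K r t : Int)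
    (ht0 : 0 ≤ t) (htr : t ≤ r + 1)
    (htrue : ∀ i : Int, 0 ≤ i → i < t → PySem.List.pyGetD rs i 0 * v ≤ K)
    (hfalse : ∀ i : Int, t ≤ i → i ≤ r → ¬ PySem.List.pyGetD rs i 0 * v ≤ K) :
    topIdx rs v K r = t - 1 := by
  fun_induction topIdx rs v K r with
  | case1 r h hle =>
    by_cases hrt : t ≤ r
    · exact absurd hle (hfalse r hrt le_rfl)
    · omega
  | case2 r h hle ih =>
    have hrt : t ≤ r := by
      by_contra hlt
      exact hle (htrue r h (by omega))
    exact ih (by omega) (fun i hti hir => hfalse i hti (by omega))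
  | case3 r h => omega

-- Invariant proof of B's binary search: it returns the boundary of the true prefix.
lemma bsearchB_spec (rs : List Int) (v K r : Int)
    (hmono : ∀ i j : Int, 0 ≤ i → i ≤ j → j ≤ r →
      PySem.List.pyGetD rs j 0 * v ≤ K → PySem.List.pyGetD rs i 0 * v ≤ K)
    (lo hi : Int) (hlo : 0 ≤ lo) (hlohi : lo ≤ hi) (hhi : hi ≤ r + 1)
    (hpre : ∀ i : Int, 0 ≤ i → i < lo → PySem.List.pyGetD rs i 0 * v ≤ K)
    (hpost : ∀ i : Int, hi ≤ i → i ≤ r → ¬ PySem.List.pyGetD rs i 0 * v ≤ K) :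
    lo ≤ bsearchB rs v K lo hi ∧ bsearchB rs v K lo hi ≤ hi ∧
    (∀ i : Int, 0 ≤ i → i < bsearchB rs v K lo hi → PySem.List.pyGetD rs i 0 * v ≤ K) ∧
    (∀ i : Int, bsearchB rs v K lo hi ≤ i → i ≤ r → ¬ PySem.List.pyGetD rs i 0 * v ≤ K) := by
  fun_induction bsearchB rs v K lo hi with
  | case1 lo hi h mid hle ih =>
    have hb := PySem.Int.floordiv_two_mid_bounds (lo := lo) (hi := hi) (by omega)
    have hmidlt : PySem.Int.floordiv (lo + hi) 2 < hi :=
      (PySem.Int.floordiv_lt_iff_lt_mul (by norm_num)).mpr (by omega)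
    obtain ⟨h1, h2, h3, h4⟩ := ih (by omega) (by omega) (by omega)
      (fun i hi0 hilt => by
        by_cases hcase : i < lo
        · exact hpre i hi0 hcase
        · exact hmono i mid hi0 (by omega) (by omega) hle)
      hpost
    exact ⟨by omega, h2, h3, h4⟩
  | case2 lo hi h mid hle ih =>
    have hb := PySem.Int.floordiv_two_mid_bounds (lo := lo) (hi := hi) (by omega)
    have hmidlt : PySem.Int.floordiv (lo + hi) 2 < hi :=
      (PySem.Int.floordiv_lt_iff_lt_mul (by norm_num)).mpr (by omega)
    obtain ⟨h1, h2, h3, h4⟩ := ih hlo (by omega) (by omega) hpre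
      (fun i hmi hir hP => hle (hmono mid i (by omega) hmi hir hP))
    exact ⟨h1, by omega, h3, h4⟩
  | case3 lo hi h =>
    exact ⟨le_rfl, by omega, fun i hi0 hilt => hpre i hi0 hilt,
      fun i hli hir => hpost i (by omega) hir⟩

-- Sortedness of rs, phrased on pyGetD over in-range Int indices.
lemma sorted_pyGetD_mono (xs : List Int) (i j : Int) (hi : 0 ≤ i) (hij : i ≤ j)
    (hj : j < ((PySem.List.sorted xs (fun x => x)).length : Int)) :
    PySem.List.pyGetD (PySem.List.sorted xs (fun x => x)) i 0 ≤
    PySem.List.pyGetD (PySem.List.sorted xs (fun x => x)) j 0 := by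
  have hjn : j.toNat < (PySem.List.sorted xs (fun x => x)).length := by omega
  have hin : i.toNat ≤ j.toNat := by omega
  rw [PySem.List.pyGetD_of_nonneg _ _ hi, PySem.List.pyGetD_of_nonneg _ _ (by omega)]
  rw [List.getD_eq_getElem?_getD, List.getD_eq_getElem?_getD]
  rw [List.getElem?_eq_getElem (by omega), List.getElem?_eq_getElem hjn]
  exact PySem.List.sorted_id_getElem_mono xs hin hjn

-- Main loop equivalence: A's two-pointer loop at column index c equals B's loop on the
-- remaining column suffix, for a sorted row list.
lemma loopA_eq_loopB (xs cs : List Int) (K : Int) (vs : List Int) (c r total : Int)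
    (hc : 0 ≤ c) (hdrop : cs.drop c.toNat = vs)
    (hr : r < ((PySem.List.sorted xs (fun x => x)).length : Int)) :
    solveLoopA (PySem.List.sorted xs (fun x => x)) cs K r c total =
    solveLoopB (PySem.List.sorted xs (fun x => x)) K vs r total := by
  induction vs generalizing c r total with
  | nil =>
    have hlen : cs.length ≤ c.toNat := List.drop_eq_nil_iff.mp hdrop
    rw [solveLoopA, dif_neg (by omega), solveLoopB]
  | cons v rest ih =>
    have hclen : c.toNat < cs.length := by
      by_contra hge
      rw [List.drop_eq_nil_iff.mpr (by omega)] at hdrop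
      exact List.cons_ne_nil _ _ hdrop.symm
    have hv' : cs[c.toNat]? = some v := by
      have h0 : (cs.drop c.toNat)[0]? = some v := by rw [hdrop]; rfl
      rwa [List.getElem?_drop, Nat.add_zero] at h0
    have hv : PySem.List.pyGetD cs c 0 = v := by
      rw [PySem.List.pyGetD_of_nonneg _ _ hc, List.getD_eq_getElem?_getD, hv']
      rfl
    have hdropsucc : cs.drop (c + 1).toNat = rest := by
      rw [show (c + 1).toNat = c.toNat + 1 from by omega, ← List.drop_drop, hdrop]
      rfl
    rw [loopA_step (PySem.List.sorted xs (fun x => x)) cs K r c total v hv (by omega)]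
    rw [solveLoopB]
    by_cases hrneg : r < 0
    · have ht : topIdx (PySem.List.sorted xs (fun x => x)) v K r = -1 := by
        rw [topIdx, dif_neg (by omega)]
      rw [ht, if_neg (by omega), if_pos hrneg]
    · rw [if_neg hrneg]
      by_cases hvsign : v ≤ 0
      · rw [if_pos hvsign]
        by_cases hfail : PySem.List.pyGetD (PySem.List.sorted xs (fun x => x)) r 0 * v ≤ K
        · have ht : topIdx (PySem.List.sorted xs (fun x => x)) v K r = r := by
            rw [topIdx, dif_pos (by omega), if_pos hfail]
          rw [ht, if_pos (by omega), if_neg (by omega)]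
          exact ih (c + 1) r (total + (r + 1)) (by omega) hdropsucc hr
        · have ht : topIdx (PySem.List.sorted xs (fun x => x)) v K r = -1 :=
            topIdx_eq_neg_one _ v K r
              (fun i j hi hij hj hP =>
                le_trans (mul_le_mul_of_nonpos_right
                  (sorted_pyGetD_mono xs i j hi hij (by omega)) hvsign) hP)
              (fun i hi hir hP =>
                hfail (le_trans (mul_le_mul_of_nonpos_right
                  (sorted_pyGetD_mono xs i r hi hir (by omega)) hvsign) hP))
          rw [ht, if_neg (by omega), if_pos (by omega)]
      · rw [if_neg hvsign]
        rw [not_le] at hvsign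
        obtain ⟨hb1, hb2, hb3, hb4⟩ :=
          bsearchB_spec (PySem.List.sorted xs (fun x => x)) v K r
            (fun i j hi hij hjr hP =>
              le_trans (mul_le_mul_of_nonneg_right
                (sorted_pyGetD_mono xs i j hi hij (by omega)) (le_of_lt hvsign)) hP)
            0 (r + 1) le_rfl (by omega) le_rfl
            (fun i h1 h2 => absurd h1 (by omega))
            (fun i h1 h2 => absurd h1 (by omega))
        have ht : topIdx (PySem.List.sorted xs (fun x => x)) v K r =
            bsearchB (PySem.List.sorted xs (fun x => x)) v K 0 (r + 1) - 1 :=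
          topIdx_eq_of_boundary _ v K r _ hb1 hb2 hb3 hb4
        by_cases ht0 : bsearchB (PySem.List.sorted xs (fun x => x)) v K 0 (r + 1) = 0
        · rw [ht, ht0, if_neg (by omega)]
          simp
        · rw [ht, if_pos (by omega)]
          simp only [if_neg ht0]
          exact ih (c + 1) _ _ (by omega) hdropsucc (by omega)

-- ===== VERDICT (by name: the statement is the Claim_ definition above) =====
theorem solve_spec : Claim_equal_solve := by
  intro rows cols K _
  unfold Spec_solve solve solve_alt
  exact loopA_eq_loopB rows (PySem.List.sorted cols (fun x => x)) K _ 0 _ 0 le_rfl rfl (by omega)
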